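-- pv_equiv track=rewrite | github.com/Edward-Tsang/Python-Sevens | texasHoldEm.py | checkforSameSuit
-- ===== SOURCE A (Python) =====
-- def checkforSameSuit(cards):
--     suit = cards[0][0:1]
--     for card in range(1, len(cards)):
--         if cards[card][0:1] == suit:
--             continue
--         else:
--             return 0
--     return 1
-- ===== SOURCE B (Python) =====
-- def checkforSameSuit(cards):
--     suits = {card[0:1] for card in cards}
--     return 1 if len(suits) <= 1 else 0
-- ===== Notes on version B (the rewrite author's own statement) =====
-- stated objective: idiomatic
-- what changed: B collects the distinct first-character suits into a set in one comprehension and tests its size, instead of A's indexed loop comparing each card to the first card's suit with an early return.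
import Mathlib
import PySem

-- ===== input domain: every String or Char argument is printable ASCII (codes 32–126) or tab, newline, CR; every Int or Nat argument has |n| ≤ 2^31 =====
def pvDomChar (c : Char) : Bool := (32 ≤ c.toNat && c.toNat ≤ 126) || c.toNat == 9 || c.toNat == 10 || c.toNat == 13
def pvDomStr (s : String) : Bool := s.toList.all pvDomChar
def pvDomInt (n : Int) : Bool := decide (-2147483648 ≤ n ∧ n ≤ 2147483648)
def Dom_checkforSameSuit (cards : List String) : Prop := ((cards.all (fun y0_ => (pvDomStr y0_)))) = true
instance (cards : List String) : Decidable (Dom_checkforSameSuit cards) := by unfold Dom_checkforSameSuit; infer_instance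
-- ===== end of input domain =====

-- B is the idiomatic set-based check: collect the distinct first-character suits and test the set's size,
-- instead of A's indexed loop comparing every card to the first card's suit with an early return.

-- ===== PORT A =====
-- the 'for card in range(1, len(cards))' loop with its early 'return 0'
def checkAuxA (suit : String) (rest : List String) : Int :=
  match rest with
  | [] => 1
  | c :: cs => if PySem.Str.slice c (some 0) (some 1) = suit then checkAuxA suit cs else 0

def checkforSameSuit (cards : List String) : Int :=
  match cards with
  | [] => 0   -- cards[0] raises IndexError in Python; excluded by Pre_
  | c0 :: rest => checkAuxA (PySem.Str.slice c0 (some 0) (some 1)) rest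

-- ===== PORT B =====
def checkforSameSuit_alt (cards : List String) : Int :=
  let suits : PySem.Set String := PySem.Set.ofList (cards.map (fun card => PySem.Str.slice card (some 0) (some 1)))
  if PySem.Set.len suits ≤ 1 then 1 else 0

-- ===== PRECONDITION & SPEC =====
-- Pre_ excludes only the empty list, on which A raises IndexError (cards[0]).
def Pre_checkforSameSuit (cards : List String) : Prop := cards ≠ []
instance (cards : List String) : Decidable (Pre_checkforSameSuit cards) := by unfold Pre_checkforSameSuit; infer_instance
def pvWitness_checkforSameSuit : List String := ["S2", "S3"]

def Spec_checkforSameSuit (cards : List String) (out : Int) : Prop := out = checkforSameSuit_alt cards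
instance (cards : List String) (out : Int) : Decidable (Spec_checkforSameSuit cards out) := by unfold Spec_checkforSameSuit; infer_instance

-- ===== CLAIM (what is proved, stated in full; the proofs are below) =====
def Claim_equal_checkforSameSuit : Prop := ∀ (cards : List String), Dom_checkforSameSuit cards → Pre_checkforSameSuit cards → Spec_checkforSameSuit cards (checkforSameSuit cards)

-- ===== LEMMAS AND PROOFS =====

-- A's loop returns 1 exactly when every remaining card's first character equals the reference suit.
theorem checkAuxA_eq (suit : String) (rest : List String) :
    checkAuxA suit rest = (if rest.all (fun c => PySem.Str.slice c (some 0) (some 1) == suit) then 1 else 0) := by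
  induction rest with
  | nil => simp [checkAuxA]
  | cons c cs ih =>
      simp only [checkAuxA, List.all_cons, Bool.and_eq_true, beq_iff_eq]
      by_cases h : PySem.Str.slice c (some 0) (some 1) = suit <;> simp [h, ih]

-- adding elements never shrinks a set
theorem length_le_foldl_add {α : Type} [BEq α] (m : List α) (s : List α) :
    s.length ≤ (m.foldl PySem.Set.add s).length := by
  induction m generalizing s with
  | nil => simp
  | cons y ys ih =>
      refine le_trans ?_ (ih (PySem.Set.add s y))
      unfold PySem.Set.add
      split <;> simp

-- the set built from [x] stays of size ≤ 1 exactly when every further element equals x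
theorem foldl_add_singleton_len {α : Type} [BEq α] [LawfulBEq α] (m : List α) (x : α) :
    ((m.foldl PySem.Set.add [x]).length ≤ 1) ↔ (m.all (fun y => y == x)) := by
  induction m with
  | nil => simp
  | cons y ys ih =>
      simp only [List.foldl_cons, List.all_cons, Bool.and_eq_true, beq_iff_eq]
      by_cases h : y = x
      · have : PySem.Set.add [x] y = [x] := by
          subst h; simp [PySem.Set.add_of_mem]
        rw [this, ih]
        simp [h]
      · have hx : PySem.Set.add [x] y = [x, y] := by
          rw [PySem.Set.add_of_not_mem]; · rfl
          · simp [h]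
        rw [hx]
        have h2 : 2 ≤ (ys.foldl PySem.Set.add [x, y]).length := by
          simpa using length_le_foldl_add (α := α) ys [x, y]
        constructor
        · intro hle; omega
        · rintro ⟨hyx, -⟩; exact absurd hyx h

theorem alt_cons (c0 : String) (rest : List String) :
    checkforSameSuit_alt (c0 :: rest) =
      (if rest.all (fun c => PySem.Str.slice c (some 0) (some 1) == PySem.Str.slice c0 (some 0) (some 1)) then 1 else 0) := by
  unfold checkforSameSuit_alt
  simp only [List.map_cons, PySem.Set.ofList_eq_foldl, List.foldl_cons]
  have h0 : PySem.Set.add ([] : List String) (PySem.Str.slice c0 (some 0) (some 1)) = [PySem.Str.slice c0 (some 0) (some 1)] := by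
    rw [PySem.Set.add_of_not_mem] <;> simp
  simp only [h0]
  have hlen := foldl_add_singleton_len (rest.map (fun card => PySem.Str.slice card (some 0) (some 1))) (PySem.Str.slice c0 (some 0) (some 1))
  simp only [List.all_map] at hlen
  unfold PySem.Set.len
  by_cases hall : rest.all (fun c => PySem.Str.slice c (some 0) (some 1) == PySem.Str.slice c0 (some 0) (some 1))
  · rw [if_pos, if_pos hall]
    · have := hlen.mpr (by simpa using hall)
      exact_mod_cast this
  · rw [if_neg, if_neg hall]
    · intro hle
      exact hall (by simpa using hlen.mp (by exact_mod_cast hle))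

-- ===== VERDICT (by name: the statement is the Claim_ definition above) =====
theorem checkforSameSuit_spec : Claim_equal_checkforSameSuit := by
  intro cards _ hpre
  unfold Spec_checkforSameSuit
  match cards with
  | [] => exact absurd rfl hpre
  | c0 :: rest =>
      rw [alt_cons]
      simp only [checkforSameSuit, checkAuxA_eq]
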